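-- pv_equiv track=rewrite | github.com/inaciovasquez2020/chronos-urf-rr | tools/verify_ball_volume_acyclicity.py | ball_vertices
-- ===== SOURCE A (Python) =====
-- from collections import deque
--
-- def adjacency(n: int, edges: set[tuple[int, int]]) -> list[set[int]]:
--     adj = [set() for _ in range(n)]
--     for a, b in edges:
--         if not (0 <= a < n and 0 <= b < n):
--             raise ValueError("edge endpoint out of range")
--         adj[a].add(b)
--         adj[b].add(a)
--     return adj
--
-- def ball_vertices(n: int, edges: set[tuple[int, int]], root: int, radius: int) -> set[int]:
--     adj = adjacency(n, edges)
--     dist = {root: 0}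
--     q = deque([root])
--
--     while q:
--         x = q.popleft()
--         if dist[x] == radius:
--             continue
--         for y in adj[x]:
--             if y not in dist:
--                 dist[y] = dist[x] + 1
--                 q.append(y)
--
--     return set(dist)
-- ===== SOURCE B (Python) =====
-- def adjacency(n, edges):
--     adj = [set() for _ in range(n)]
--     for a, b in edges:
--         if not (0 <= a < n and 0 <= b < n):
--             raise ValueError("edge endpoint out of range")
--         adj[a].add(b)
--         adj[b].add(a)
--     return adj
--
-- def ball_vertices(n, edges, root, radius):
--     adj = adjacency(n, edges)
--     visited = {root}
--     frontier = {root}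
--     level = 0
--     while frontier and level != radius:
--         new_frontier = {y for x in frontier for y in adj[x] if y not in visited}
--         visited |= new_frontier
--         frontier = new_frontier
--         level += 1
--     return visited
-- ===== Notes on version B (the rewrite author's own statement) =====
-- stated objective: alternative
-- what changed: Replaces the per-node deque-plus-distance-dict BFS with a level-synchronous BFS that keeps only a visited set and a frontier set and an integer level counter, stopping when the level reaches radius (never for a negative radius, matching A's flood).
import Mathlib
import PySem

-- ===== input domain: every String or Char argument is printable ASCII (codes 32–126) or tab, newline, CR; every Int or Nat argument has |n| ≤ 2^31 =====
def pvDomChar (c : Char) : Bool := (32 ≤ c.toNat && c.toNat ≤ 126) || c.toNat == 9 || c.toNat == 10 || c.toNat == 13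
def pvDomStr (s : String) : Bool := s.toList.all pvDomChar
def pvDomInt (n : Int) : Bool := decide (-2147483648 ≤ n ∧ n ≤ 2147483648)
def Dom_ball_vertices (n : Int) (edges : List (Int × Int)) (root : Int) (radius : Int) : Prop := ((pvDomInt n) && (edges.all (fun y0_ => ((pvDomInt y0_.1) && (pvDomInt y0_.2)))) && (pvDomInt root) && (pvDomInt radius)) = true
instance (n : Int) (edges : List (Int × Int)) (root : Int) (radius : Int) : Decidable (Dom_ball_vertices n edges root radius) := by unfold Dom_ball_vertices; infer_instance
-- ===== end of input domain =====

-- B replaces A's deque-plus-distance-dict BFS by a level-synchronous BFS over whole frontier sets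
-- with an integer level counter (objective: alternative decomposition; same asymptotic cost).

-- ===== PORT A =====
-- adjacency(n, edges): Source A and Source B contain this identical helper; ported once, used by both ports.
-- 'raise ValueError' becomes 'none' (excluded by Pre_).
def pvAdjLoop (n : Int) (es : List (Int × Int)) (adj : List (PySem.Set Int)) : Option (List (PySem.Set Int)) :=
  match es with
  | [] => some adj
  | (a, b) :: es =>
    if 0 ≤ a ∧ a < n ∧ 0 ≤ b ∧ b < n then
      pvAdjLoop n es ((adj.modify a.toNat (fun s => PySem.Set.add s b)).modify b.toNat (fun s => PySem.Set.add s a))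
    else none

def pvAdjacency? (n : Int) (edges : List (Int × Int)) : Option (List (PySem.Set Int)) :=
  pvAdjLoop n edges (List.replicate n.toNat PySem.Set.empty)

-- adj[x]: Python list indexing (negative x counts from the end; out of range = IndexError, excluded
-- by Pre_ and defaulted to the empty set here, identically in both ports).
def pvAdjAt (adj : List (PySem.Set Int)) (x : Int) : PySem.Set Int :=
  (PySem.List.pyGet? adj x).getD PySem.Set.empty

-- every vertex occurring in some neighbour set (used only by the termination measures)
def pvUniv (adj : List (PySem.Set Int)) : List Int := PySem.Set.ofList (adj.flatMap (fun s => s))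

-- body of A's inner 'for y in adj[x]' loop
def pvInnerA (x : Int) (s : PySem.Dict Int Int × List Int) (y : Int) : PySem.Dict Int Int × List Int :=
  if (s.1.get? y).isNone then (s.1.insert y (s.1.getD x 0 + 1), s.2 ++ [y]) else s

lemma pvMem_univ {adj : List (PySem.Set Int)} {x y : Int} (h : y ∈ pvAdjAt adj x) : y ∈ pvUniv adj := by
  unfold pvAdjAt at h
  cases hg : PySem.List.pyGet? adj x with
  | none => rw [hg] at h; cases h
  | some s =>
    rw [hg] at h
    have hs : s ∈ adj := PySem.List.mem_of_pyGet?_eq_some adj hg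
    exact (PySem.Set.mem_ofList _ _).2 (List.mem_flatMap.2 ⟨s, hs, h⟩)

lemma pvNodup_univ (adj : List (PySem.Set Int)) : (pvUniv adj).Nodup :=
  PySem.Set.nodup_ofList _

lemma pvFilter_out_len {U : List Int} (hU : U.Nodup) {K : List Int} {y : Int}
    (hyU : y ∈ U) (hyK : y ∉ K) :
    (U.filter (fun z => decide (z ∉ K ++ [y]))).length + 1 = (U.filter (fun z => decide (z ∉ K))).length := by
  have h1 : U.filter (fun z => decide (z ∉ K ++ [y]))
      = (U.filter (fun z => decide (z ∉ K))).filter (fun z => decide (z ≠ y)) := by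
    rw [List.filter_filter]
    apply List.filter_congr
    intro z _
    simp [List.mem_append, not_or, And.comm]
  have hmem : y ∈ U.filter (fun z => decide (z ∉ K)) := by
    simp [List.mem_filter, hyU, hyK]
  have hnd : (U.filter (fun z => decide (z ∉ K))).Nodup := hU.filter _
  have h2 : (U.filter (fun z => decide (z ∉ K))).filter (fun z => decide (z ≠ y))
      = (U.filter (fun z => decide (z ∉ K))).erase y := by
    rw [hnd.erase_eq_filter y]
    apply List.filter_congr
    intro z _
    by_cases hzy : z = y <;> simp [bne, hzy]
  rw [h1, h2]
  have := List.length_erase_of_mem hmem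
  have : 1 ≤ (U.filter (fun z => decide (z ∉ K))).length := List.length_pos_of_mem hmem
  omega

lemma pvInnerA_measure (adj : List (PySem.Set Int)) (x : Int) :
    ∀ (ys : List Int) (dist : PySem.Dict Int Int) (q : List Int),
    (∀ y ∈ ys, y ∈ pvUniv adj) →
    ((pvUniv adj).filter (fun z => decide (z ∉ (ys.foldl (pvInnerA x) (dist, q)).1.keys))).length
      + (ys.foldl (pvInnerA x) (dist, q)).2.length
    ≤ ((pvUniv adj).filter (fun z => decide (z ∉ dist.keys))).length + q.length := by
  intro ys
  induction ys with
  | nil => intro dist q _; simp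
  | cons y ys ih =>
    intro dist q hmem
    rw [List.foldl_cons]
    by_cases hy : (dist.get? y).isNone
    · have hyc : dist.contains y = false := by
        rw [PySem.Dict.contains_eq_isSome_get?]
        cases h : dist.get? y with
        | none => rfl
        | some v => rw [h] at hy; simp at hy
      have hyk : y ∉ dist.keys := by
        intro hk
        exact absurd ((PySem.Dict.contains_iff_mem_keys dist y).2 hk) (by simp [hyc])
      have hstep : pvInnerA x (dist, q) y = (dist.insert y (dist.getD x 0 + 1), q ++ [y]) := by
        simp [pvInnerA, hy]
      rw [hstep]
      have hkeys : (dist.insert y (dist.getD x 0 + 1)).keys = dist.keys ++ [y] :=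
        PySem.Dict.keys_insert_of_not_contains dist _ hyc
      have hcnt := pvFilter_out_len (pvNodup_univ adj) (hmem y List.mem_cons_self) hyk
      have hrec := ih (dist.insert y (dist.getD x 0 + 1)) (q ++ [y]) (fun z hz => hmem z (List.mem_cons_of_mem _ hz))
      rw [hkeys] at hrec
      simp only [List.length_append, List.length_cons, List.length_nil] at hrec ⊢
      omega
    · have hstep : pvInnerA x (dist, q) y = (dist, q) := by
        simp [pvInnerA, hy]
      rw [hstep]
      exact ih dist q (fun z hz => hmem z (List.mem_cons_of_mem _ hz))

-- A's while-loop over the deque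
def pvLoopA (adj : List (PySem.Set Int)) (radius : Int) (dist : PySem.Dict Int Int) (q : List Int) :
    PySem.Dict Int Int :=
  match q with
  | [] => dist
  | x :: q' =>
    if dist.getD x 0 = radius then pvLoopA adj radius dist q'
    else
      pvLoopA adj radius ((pvAdjAt adj x).foldl (pvInnerA x) (dist, q')).1
        ((pvAdjAt adj x).foldl (pvInnerA x) (dist, q')).2
termination_by ((pvUniv adj).filter (fun z => decide (z ∉ dist.keys))).length + q.length
decreasing_by
  · simp only [List.length_cons]; omega
  · have := pvInnerA_measure adj x (pvAdjAt adj x) dist q' (fun y hy => pvMem_univ hy)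
    simp only [List.length_cons]; omega

def ball_vertices (n : Int) (edges : List (Int × Int)) (root : Int) (radius : Int) : List Int :=
  match pvAdjacency? n edges with
  | none => []  -- ValueError in adjacency; excluded by Pre_
  | some adj =>
      PySem.Set.ofList ((pvLoopA adj radius ((PySem.Dict.empty).insert root 0) [root]).keys)

-- ===== PORT B =====
-- body of the set comprehension {y for x in frontier for y in adj[x] if y not in visited}
def pvNFInner (visited : PySem.Set Int) (nf : PySem.Set Int) (y : Int) : PySem.Set Int :=
  if visited.contains y then nf else nf.add y

def pvNewFrontier (adj : List (PySem.Set Int)) (visited frontier : PySem.Set Int) : PySem.Set Int :=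
  frontier.foldl (fun nf x => (pvAdjAt adj x).foldl (pvNFInner visited) nf) PySem.Set.empty

lemma pvNF_mem {visited : PySem.Set Int} :
    ∀ (ys : List Int) (nf : List Int) (y : Int),
    y ∈ ys.foldl (pvNFInner visited) nf → y ∈ nf ∨ (y ∈ ys ∧ y ∉ visited) := by
  intro ys
  induction ys with
  | nil => intro nf y h; exact Or.inl h
  | cons z zs ih =>
    intro nf y h
    rw [List.foldl_cons] at h
    rcases ih _ y h with h1 | h1
    · unfold pvNFInner at h1
      by_cases hz : visited.contains z
      · rw [if_pos hz] at h1; exact Or.inl h1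
      · rw [if_neg hz] at h1
        rcases (PySem.Set.mem_add _ _ _).1 h1 with h2 | h2
        · exact Or.inl h2
        · refine Or.inr ⟨h2 ▸ List.mem_cons_self, ?_⟩
          rw [h2]
          intro hmem
          exact hz ((PySem.Set.contains_iff _ _).2 hmem)
    · exact Or.inr ⟨List.mem_cons_of_mem _ h1.1, h1.2⟩

lemma pvNewFrontier_mem {adj : List (PySem.Set Int)} {visited : PySem.Set Int} :
    ∀ (fr : List Int) (nf : List Int) (y : Int),
    y ∈ fr.foldl (fun nf x => (pvAdjAt adj x).foldl (pvNFInner visited) nf) nf →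
    y ∈ nf ∨ (y ∈ pvUniv adj ∧ y ∉ visited) := by
  intro fr
  induction fr with
  | nil => intro nf y h; exact Or.inl h
  | cons x xs ih =>
    intro nf y h
    rw [List.foldl_cons] at h
    rcases ih _ y h with h1 | h1
    · rcases pvNF_mem _ _ y h1 with h2 | h2
      · exact Or.inl h2
      · exact Or.inr ⟨pvMem_univ h2.1, h2.2⟩
    · exact Or.inr h1

lemma pvSublist_filter_lt {U vis vis' : List Int} (hsub : ∀ z, z ∈ vis → z ∈ vis') {y : Int}
    (hyU : y ∈ U) (hy' : y ∈ vis') (hyv : y ∉ vis) :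
    (U.filter (fun z => decide (z ∉ vis'))).length < (U.filter (fun z => decide (z ∉ vis))).length := by
  have hsl : (U.filter (fun z => decide (z ∉ vis'))).Sublist (U.filter (fun z => decide (z ∉ vis))) := by
    apply List.monotone_filter_right
    intro a ha
    simp only [decide_eq_true_eq] at ha ⊢
    exact fun hmem => ha (hsub a hmem)
  rcases Nat.lt_or_ge (U.filter (fun z => decide (z ∉ vis'))).length (U.filter (fun z => decide (z ∉ vis))).length with h | h
  · exact h
  · exfalso
    have heq := hsl.eq_of_length (Nat.le_antisymm hsl.length_le h)
    have hy1 : y ∈ U.filter (fun z => decide (z ∉ vis)) := by simp [List.mem_filter, hyU, hyv]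
    rw [← heq] at hy1
    have := (List.mem_filter.1 hy1).2
    simp at this
    exact this hy'

-- B's level-synchronous while-loop
def pvLoopB (adj : List (PySem.Set Int)) (radius : Int) (visited frontier : PySem.Set Int)
    (level : Int) : PySem.Set Int :=
  if frontier = ([] : List Int) ∨ level = radius then visited
  else
    pvLoopB adj radius (visited.union (pvNewFrontier adj visited frontier))
      (pvNewFrontier adj visited frontier) (level + 1)
termination_by ((pvUniv adj).filter (fun z => decide (z ∉ visited))).length * 2
  + (if frontier = ([] : List Int) then 0 else 1)
decreasing_by
  rename_i hnot
  rcases h : pvNewFrontier adj visited frontier with _ | ⟨y, nf'⟩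
  · have hv : visited.union ([] : List Int) = visited := rfl
    rw [hv]
    have : ¬ (frontier = ([] : List Int)) := fun hf => hnot (Or.inl hf)
    simp [this]
  · rw [← h]
    have hy : y ∈ pvNewFrontier adj visited frontier := by rw [h]; exact List.mem_cons_self
    have hy2 : y ∈ pvUniv adj ∧ y ∉ visited := by
      rcases pvNewFrontier_mem frontier PySem.Set.empty y hy with h' | h'
      · cases h'
      · exact h'
    have hsub : ∀ z, z ∈ visited → z ∈ visited.union (pvNewFrontier adj visited frontier) := by
      intro z hz
      exact (PySem.Set.mem_update _ _ _).2 (Or.inl hz)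
    have hy' : y ∈ visited.union (pvNewFrontier adj visited frontier) := by
      exact (PySem.Set.mem_update _ _ _).2 (Or.inr hy)
    have := pvSublist_filter_lt hsub hy2.1 hy' hy2.2
    have h1 : (if pvNewFrontier adj visited frontier = ([] : List Int) then 0 else 1) ≤ 1 := by
      split <;> omega
    omega

def ball_vertices_alt (n : Int) (edges : List (Int × Int)) (root : Int) (radius : Int) : List Int :=
  match pvAdjacency? n edges with
  | none => []  -- ValueError in adjacency; excluded by Pre_
  | some adj => pvLoopB adj radius (PySem.Set.ofList [root]) (PySem.Set.ofList [root]) 0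

-- ===== PRECONDITION & SPEC =====
-- Pre_ excludes exactly the inputs on which the Python A raises: a ValueError when some edge endpoint
-- is outside [0, n), and an IndexError when radius ≠ 0 and root is outside [-n, n) (A then reads adj[root]).
def Pre_ball_vertices (n : Int) (edges : List (Int × Int)) (root : Int) (radius : Int) : Prop :=
  (∀ e ∈ edges, 0 ≤ e.1 ∧ e.1 < n ∧ 0 ≤ e.2 ∧ e.2 < n) ∧ (radius = 0 ∨ (-n ≤ root ∧ root < n))
instance (n : Int) (edges : List (Int × Int)) (root : Int) (radius : Int) : Decidable (Pre_ball_vertices n edges root radius) := by unfold Pre_ball_vertices; infer_instance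

def pvWitness_ball_vertices : Int × (List (Int × Int)) × Int × Int := (3, [(0, 1), (1, 2)], 0, 1)

def Spec_ball_vertices (n : Int) (edges : List (Int × Int)) (root : Int) (radius : Int) (out : List Int) : Prop := out = ball_vertices_alt n edges root radius
instance (n : Int) (edges : List (Int × Int)) (root : Int) (radius : Int) (out : List Int) : Decidable (Spec_ball_vertices n edges root radius out) := by unfold Spec_ball_vertices; infer_instance

-- ===== CLAIM (what is proved, stated in full; the proofs are below) =====
def Claim_equal_ball_vertices : Prop := ∀ (n : Int) (edges : List (Int × Int)) (root : Int) (radius : Int), Dom_ball_vertices n edges root radius → Pre_ball_vertices n edges root radius → Spec_ball_vertices n edges root radius (ball_vertices n edges root radius)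

-- ===== LEMMAS AND PROOFS =====
-- the fresh vertices discovered while scanning ys, given the already-seen list
def pvDisc (seen : List Int) (ys : List Int) : List Int :=
  match ys with
  | [] => []
  | y :: ys => if y ∈ seen then pvDisc seen ys else y :: pvDisc (seen ++ [y]) ys

-- the fresh vertices discovered by one whole BFS level
def pvNewL (adj : List (PySem.Set Int)) (seen : List Int) (fr : List Int) : List Int :=
  match fr with
  | [] => []
  | x :: fr => pvDisc seen (pvAdjAt adj x) ++ pvNewL adj (seen ++ pvDisc seen (pvAdjAt adj x)) fr


lemma pvDisc_mem : ∀ (ys seen : List Int) (y : Int), y ∈ pvDisc seen ys → y ∈ ys ∧ y ∉ seen := by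
  intro ys
  induction ys with
  | nil => intro seen y h; cases h
  | cons z zs ih =>
    intro seen y h
    rw [pvDisc] at h
    by_cases hz : z ∈ seen
    · rw [if_pos hz] at h
      have := ih seen y h
      exact ⟨List.mem_cons_of_mem _ this.1, this.2⟩
    · rw [if_neg hz] at h
      rcases List.mem_cons.1 h with rfl | h1
      · exact ⟨List.mem_cons_self, hz⟩
      · have := ih (seen ++ [z]) y h1
        exact ⟨List.mem_cons_of_mem _ this.1, fun hm => this.2 (List.mem_append_left _ hm)⟩


lemma pvDisc_nodup_append : ∀ (ys seen : List Int), seen.Nodup → (seen ++ pvDisc seen ys).Nodup := by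
  intro ys
  induction ys with
  | nil => intro seen h; simpa [pvDisc] using h
  | cons z zs ih =>
    intro seen h
    rw [pvDisc]
    by_cases hz : z ∈ seen
    · rw [if_pos hz]; exact ih seen h
    · rw [if_neg hz, List.append_cons]
      exact ih _ (by simp [List.nodup_append, h]; exact fun a ha he => hz (he ▸ ha))


lemma pvNewL_mem (adj : List (PySem.Set Int)) :
    ∀ (fr seen : List Int) (y : Int), y ∈ pvNewL adj seen fr → y ∈ pvUniv adj ∧ y ∉ seen := by
  intro fr
  induction fr with
  | nil => intro seen y h; cases h
  | cons x xs ih =>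
    intro seen y h
    rw [pvNewL] at h
    rcases List.mem_append.1 h with h1 | h1
    · have := pvDisc_mem _ _ _ h1
      exact ⟨pvMem_univ this.1, this.2⟩
    · have := ih (seen ++ pvDisc seen (pvAdjAt adj x)) y h1
      exact ⟨this.1, fun hm => this.2 (List.mem_append_left _ hm)⟩


lemma pvNewL_nodup_append (adj : List (PySem.Set Int)) :
    ∀ (fr seen : List Int), seen.Nodup → (seen ++ pvNewL adj seen fr).Nodup := by
  intro fr
  induction fr with
  | nil => intro seen h; simpa [pvNewL] using h
  | cons x xs ih =>
    intro seen h
    rw [pvNewL, ← List.append_assoc]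
    exact ih _ (pvDisc_nodup_append _ _ h)


lemma pvInnerA_char (x : Int) :
    ∀ (ys : List Int) (dist : PySem.Dict Int Int) (q : List Int),
    dist.contains x = true →
    ((ys.foldl (pvInnerA x) (dist, q)).1.keys = dist.keys ++ pvDisc dist.keys ys)
    ∧ ((ys.foldl (pvInnerA x) (dist, q)).2 = q ++ pvDisc dist.keys ys)
    ∧ (∀ k v, dist.get? k = some v → (ys.foldl (pvInnerA x) (dist, q)).1.get? k = some v)
    ∧ (∀ y ∈ pvDisc dist.keys ys, (ys.foldl (pvInnerA x) (dist, q)).1.get? y = some (dist.getD x 0 + 1)) := by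
  intro ys
  induction ys with
  | nil =>
    intro dist q hx
    refine ⟨by simp [pvDisc], by simp [pvDisc], fun k v h => h, fun y hy => by cases hy⟩
  | cons y ys ih =>
    intro dist q hx
    rw [List.foldl_cons]
    by_cases hy : (dist.get? y).isNone
    · have hyn : dist.get? y = none := by
        cases h : dist.get? y with
        | none => rfl
        | some v => rw [h] at hy; simp at hy
      have hyc : dist.contains y = false := by
        rw [PySem.Dict.contains_eq_isSome_get?, hyn]; rfl
      have hyk : y ∉ dist.keys := fun hk =>
        absurd ((PySem.Dict.contains_iff_mem_keys dist y).2 hk) (by simp [hyc])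
      have hxny : x ≠ y := by
        intro he; rw [← he] at hyc; rw [hx] at hyc; cases hyc
      have hstep : pvInnerA x (dist, q) y = (dist.insert y (dist.getD x 0 + 1), q ++ [y]) := by
        simp [pvInnerA, hy]
      rw [hstep]
      have hkeys := PySem.Dict.keys_insert_of_not_contains dist (dist.getD x 0 + 1) hyc
      have hxc : (dist.insert y (dist.getD x 0 + 1)).contains x = true := by
        rw [PySem.Dict.contains_insert]; simp [hx]
      have hgx : (dist.insert y (dist.getD x 0 + 1)).getD x 0 = dist.getD x 0 := by
        rw [PySem.Dict.getD_insert]; simp [hxny]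
      obtain ⟨ih1, ih2, ih3, ih4⟩ := ih (dist.insert y (dist.getD x 0 + 1)) (q ++ [y]) hxc
      have hdisc : pvDisc dist.keys (y :: ys) = y :: pvDisc (dist.keys ++ [y]) ys := by
        rw [pvDisc, if_neg hyk]
      rw [hdisc]
      refine ⟨?_, ?_, ?_, ?_⟩
      · rw [ih1, hkeys, List.append_assoc]; rfl
      · rw [ih2, hkeys, List.append_assoc]; rfl
      · intro k v hk
        have hky : ¬ (k = y) := by
          intro he; rw [he, hyn] at hk; cases hk
        apply ih3
        rw [PySem.Dict.get?_insert, if_neg hky]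
        exact hk
      · intro z hz
        rcases List.mem_cons.1 hz with rfl | hz'
        · exact ih3 z _ (PySem.Dict.get?_insert_self _ _ _)
        · rw [hkeys] at ih4
          have := ih4 z hz'
          rw [hgx] at this
          exact this
    · have hyk : y ∈ dist.keys := by
        apply (PySem.Dict.contains_iff_mem_keys dist y).1
        rw [PySem.Dict.contains_eq_isSome_get?]
        cases h : dist.get? y with
        | none => rw [h] at hy; simp at hy
        | some v => rfl
      have hstep : pvInnerA x (dist, q) y = (dist, q) := by simp [pvInnerA, hy]
      have hdisc : pvDisc dist.keys (y :: ys) = pvDisc dist.keys ys := by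
        rw [pvDisc, if_pos hyk]
      rw [hstep, hdisc]
      exact ih dist q hx


lemma pvSkip (adj : List (PySem.Set Int)) (radius : Int) :
    ∀ (q : List Int) (dist : PySem.Dict Int Int),
    (∀ x ∈ q, dist.getD x 0 = radius) → pvLoopA adj radius dist q = dist := by
  intro q
  induction q with
  | nil => intro dist _; rw [pvLoopA]
  | cons x q ih =>
    intro dist h
    rw [pvLoopA, if_pos (h x List.mem_cons_self)]
    exact ih dist (fun z hz => h z (List.mem_cons_of_mem _ hz))


lemma pvLevel (adj : List (PySem.Set Int)) (radius d : Int) (hd : d ≠ radius) :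
    ∀ (fr : List Int) (dist : PySem.Dict Int Int) (q : List Int),
    dist.keys.Nodup →
    (∀ x ∈ fr, dist.get? x = some d) →
    ∃ dist', pvLoopA adj radius dist (fr ++ q) = pvLoopA adj radius dist' (q ++ pvNewL adj dist.keys fr)
      ∧ dist'.keys = dist.keys ++ pvNewL adj dist.keys fr
      ∧ (∀ k v, dist.get? k = some v → dist'.get? k = some v)
      ∧ (∀ y ∈ pvNewL adj dist.keys fr, dist'.get? y = some (d + 1)) := by
  intro fr
  induction fr with
  | nil =>
    intro dist q hnd hfr
    exact ⟨dist, by simp [pvNewL], by simp [pvNewL], fun k v h => h, fun y hy => by simp [pvNewL] at hy⟩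
  | cons x fr ih =>
    intro dist q hnd hfr
    have hgx : dist.get? x = some d := hfr x List.mem_cons_self
    have hgd : dist.getD x 0 = d := by
      rw [PySem.Dict.getD_eq_get?_getD, hgx]; rfl
    have hcx : dist.contains x = true := by
      rw [PySem.Dict.contains_eq_isSome_get?, hgx]; rfl
    obtain ⟨c1, c2, c3, c4⟩ := pvInnerA_char x (pvAdjAt adj x) dist (fr ++ q) hcx
    have hnd1 : ((pvAdjAt adj x).foldl (pvInnerA x) (dist, fr ++ q)).1.keys.Nodup := by
      rw [c1]; exact pvDisc_nodup_append _ _ hnd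
    have hfr1 : ∀ x' ∈ fr, ((pvAdjAt adj x).foldl (pvInnerA x) (dist, fr ++ q)).1.get? x' = some d :=
      fun x' hx' => c3 x' d (hfr x' (List.mem_cons_of_mem _ hx'))
    obtain ⟨dist', e1, e2, e3, e4⟩ :=
      ih ((pvAdjAt adj x).foldl (pvInnerA x) (dist, fr ++ q)).1
        (q ++ pvDisc dist.keys (pvAdjAt adj x)) hnd1 hfr1
    rw [c1] at e1 e2 e4
    refine ⟨dist', ?_, ?_, ?_, ?_⟩
    · rw [List.cons_append, pvLoopA, if_neg (by rw [hgd]; exact hd)]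
      rw [c2, pvNewL]
      calc pvLoopA adj radius ((pvAdjAt adj x).foldl (pvInnerA x) (dist, fr ++ q)).1 (fr ++ q ++ pvDisc dist.keys (pvAdjAt adj x))
          = pvLoopA adj radius ((pvAdjAt adj x).foldl (pvInnerA x) (dist, fr ++ q)).1 (fr ++ (q ++ pvDisc dist.keys (pvAdjAt adj x))) := by rw [List.append_assoc]
        _ = pvLoopA adj radius dist' ((q ++ pvDisc dist.keys (pvAdjAt adj x)) ++ pvNewL adj (dist.keys ++ pvDisc dist.keys (pvAdjAt adj x)) fr) := e1
        _ = _ := by rw [List.append_assoc]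
    · rw [e2, pvNewL, List.append_assoc]
    · intro k v hk
      exact e3 k v (c3 k v hk)
    · intro y hy
      rw [pvNewL] at hy
      rcases List.mem_append.1 hy with h1 | h1
      · have := c4 y h1
        rw [hgd] at this
        exact e3 y (d + 1) this
      · exact e4 y h1


lemma pvNFInner_char (visited : PySem.Set Int) :
    ∀ (ys nf : List Int), ys.foldl (pvNFInner visited) nf = nf ++ pvDisc (visited ++ nf) ys := by
  intro ys
  induction ys with
  | nil => intro nf; simp [pvDisc]
  | cons y ys ih =>
    intro nf
    rw [List.foldl_cons, pvDisc]
    by_cases hv : y ∈ (visited : List Int)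
    · have h1 : pvNFInner visited nf y = nf := by
        unfold pvNFInner
        rw [if_pos ((PySem.Set.contains_iff _ _).2 hv)]
      rw [h1, if_pos (List.mem_append_left _ hv)]
      exact ih nf
    · have hc : visited.contains y = false := by
        cases h : visited.contains y
        · rfl
        · exact absurd ((PySem.Set.contains_iff _ _).1 h) hv
      have h1 : pvNFInner visited nf y = PySem.Set.add nf y := by
        unfold pvNFInner; rw [hc]; rfl
      by_cases hn : y ∈ nf
      · rw [h1, PySem.Set.add_of_mem hn, if_pos (List.mem_append_right _ hn)]
        exact ih nf
      · have hny : y ∉ visited ++ nf := by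
          intro hm
          rcases List.mem_append.1 hm with hm | hm
          · exact hv hm
          · exact hn hm
        rw [h1, PySem.Set.add_of_not_mem hn, if_neg hny, ih (nf ++ [y]),
          List.append_assoc, List.append_assoc]
        rfl


lemma pvNewFrontier_char (adj : List (PySem.Set Int)) (visited : PySem.Set Int) :
    ∀ (fr nf : List Int),
    fr.foldl (fun nf x => (pvAdjAt adj x).foldl (pvNFInner visited) nf) nf
      = nf ++ pvNewL adj (visited ++ nf) fr := by
  intro fr
  induction fr with
  | nil => intro nf; simp [pvNewL]
  | cons x xs ih =>
    intro nf
    rw [List.foldl_cons, pvNFInner_char visited, ih, pvNewL, List.append_assoc, List.append_assoc]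


lemma pvMain (adj : List (PySem.Set Int)) (radius : Int) :
    ∀ (k : Nat) (dist : PySem.Dict Int Int) (visited : PySem.Set Int) (fr : List Int) (d : Int),
    ((pvUniv adj).filter (fun z => decide (z ∉ visited))).length ≤ k →
    dist.keys = visited → visited.Nodup →
    (∀ x ∈ fr, dist.get? x = some d) →
    PySem.Set.ofList (pvLoopA adj radius dist fr).keys = pvLoopB adj radius visited fr d := by
  intro k
  induction k with
  | zero =>
    intro dist visited fr d hk hkeys hnd hfr
    rw [pvLoopB]
    by_cases hfr0 : fr = ([] : List Int)
    · rw [if_pos (Or.inl hfr0), hfr0, pvLoopA, hkeys]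
      exact PySem.Set.ofList_eq_self_of_nodup _ hnd
    · by_cases hdr : d = radius
      · rw [if_pos (Or.inr hdr)]
        rw [pvSkip adj radius fr dist (fun x hx => by
          rw [PySem.Dict.getD_eq_get?_getD, hfr x hx, ← hdr]; rfl), hkeys]
        exact PySem.Set.ofList_eq_self_of_nodup _ hnd
      · rw [if_neg (fun h => h.elim hfr0 hdr)]
        obtain ⟨dist', e1, e2, e3, e4⟩ := pvLevel adj radius d hdr fr dist [] (hkeys ▸ hnd) hfr
        simp only [List.append_nil, List.nil_append] at e1
        rw [hkeys] at e1 e2 e4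
        have hnf : pvNewFrontier adj visited fr = pvNewL adj visited fr := by
          unfold pvNewFrontier
          rw [pvNewFrontier_char]
          simp [PySem.Set.empty]
        have hnodup : ((visited : List Int) ++ pvNewL adj visited fr).Nodup :=
          pvNewL_nodup_append adj fr visited hnd
        by_cases hnew : pvNewL adj visited fr = ([] : List Int)
        · rw [e1, hnew, pvLoopA, pvLoopB]
          rw [hnf, hnew]
          rw [if_pos (Or.inl rfl)]
          have : dist'.keys = visited := by rw [e2, hnew, List.append_nil]
          rw [this]
          have h2 : visited.union ([] : List Int) = visited := rfl
          rw [h2]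
          exact PySem.Set.ofList_eq_self_of_nodup _ hnd
        · exfalso
          obtain ⟨y, hy⟩ := List.exists_mem_of_ne_nil _ hnew
          have hprops := pvNewL_mem adj fr visited y hy
          have hlt := pvSublist_filter_lt (vis := visited) (vis' := visited ++ pvNewL adj visited fr)
            (fun z hz => List.mem_append_left _ hz) hprops.1 (List.mem_append_right _ hy) hprops.2
          omega
  | succ k ih =>
    intro dist visited fr d hk hkeys hnd hfr
    rw [pvLoopB]
    by_cases hfr0 : fr = ([] : List Int)
    · rw [if_pos (Or.inl hfr0), hfr0, pvLoopA, hkeys]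
      exact PySem.Set.ofList_eq_self_of_nodup _ hnd
    · by_cases hdr : d = radius
      · rw [if_pos (Or.inr hdr)]
        rw [pvSkip adj radius fr dist (fun x hx => by
          rw [PySem.Dict.getD_eq_get?_getD, hfr x hx, ← hdr]; rfl), hkeys]
        exact PySem.Set.ofList_eq_self_of_nodup _ hnd
      · rw [if_neg (fun h => h.elim hfr0 hdr)]
        obtain ⟨dist', e1, e2, e3, e4⟩ := pvLevel adj radius d hdr fr dist [] (hkeys ▸ hnd) hfr
        simp only [List.append_nil, List.nil_append] at e1
        rw [hkeys] at e1 e2 e4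
        have hnf : pvNewFrontier adj visited fr = pvNewL adj visited fr := by
          unfold pvNewFrontier
          rw [pvNewFrontier_char]
          simp [PySem.Set.empty]
        have hnodup : ((visited : List Int) ++ pvNewL adj visited fr).Nodup :=
          pvNewL_nodup_append adj fr visited hnd
        have hdisj : ∀ y ∈ pvNewL adj visited fr, y ∉ (visited : List Int) :=
          fun y hy => (pvNewL_mem adj fr visited y hy).2
        have hnewnd : (pvNewL adj visited fr).Nodup := (List.nodup_append.1 hnodup).2.1
        have hunion : visited.union (pvNewFrontier adj visited fr) = visited ++ pvNewL adj visited fr := by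
          rw [hnf]
          exact PySem.Set.update_eq_append_of_disjoint visited _ hnewnd hdisj
        by_cases hnew : pvNewL adj visited fr = ([] : List Int)
        · rw [e1, hnew, pvLoopA, pvLoopB]
          rw [hnf, hnew]
          rw [if_pos (Or.inl rfl)]
          have : dist'.keys = visited := by rw [e2, hnew, List.append_nil]
          rw [this]
          have h2 : visited.union ([] : List Int) = visited := rfl
          rw [h2]
          exact PySem.Set.ofList_eq_self_of_nodup _ hnd
        · obtain ⟨y, hy⟩ := List.exists_mem_of_ne_nil _ hnew
          have hprops := pvNewL_mem adj fr visited y hy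
          have hlt := pvSublist_filter_lt (vis := visited) (vis' := visited ++ pvNewL adj visited fr)
            (fun z hz => List.mem_append_left _ hz) hprops.1 (List.mem_append_right _ hy) hprops.2
          rw [e1, hunion, hnf]
          exact ih dist' (visited ++ pvNewL adj visited fr) (pvNewL adj visited fr) (d + 1)
            (by omega) e2 hnodup e4

-- ===== VERDICT (by name: the statement is the Claim_ definition above) =====
theorem ball_vertices_spec : Claim_equal_ball_vertices := by
  intro n edges root radius _ _
  unfold Spec_ball_vertices ball_vertices ball_vertices_alt
  cases hadj : pvAdjacency? n edges with
  | none => rfl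
  | some adj =>
    have hof : PySem.Set.ofList [root] = [root] :=
      PySem.Set.ofList_eq_self_of_nodup _ (by simp)
    have hkeys : ((PySem.Dict.empty).insert root (0 : Int)).keys = [root] := by
      rw [PySem.Dict.keys_insert_of_not_contains _ _ (PySem.Dict.contains_empty root)]; rfl
    rw [hof]
    exact pvMain adj radius
      ((pvUniv adj).filter (fun z => decide (z ∉ ([root] : List Int)))).length
      ((PySem.Dict.empty).insert root 0) [root] [root] 0 le_rfl hkeys (by simp)
      (fun x hx => by
        rw [List.mem_singleton.1 hx]
        exact PySem.Dict.get?_insert_self _ _ _)
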